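-- pv_equiv track=rewrite | github.com/Bokeyx/MemoryX_Retro_Social_Platform | ai/services/matching_engine.py | find_friend_candidates
-- ===== SOURCE A (Python) =====
-- from collections import deque # 너비 우선 탐색(BFS)에 효율적인 큐 자료구조를 사용하기 위해 임포트합니다.
--
-- def find_friend_candidates(
--     target_user_id: str,
--     all_users: dict,
--     max_depth: int = 3
-- ) -> dict:
--     """
--     너비 우선 탐색(BFS)을 사용하여 특정 사용자로부터 N촌 이내의 사용자들을 찾는 함수.
--
--     Args:
--         target_user_id (str): 탐색을 시작할 사용자의 ID.
--         all_users (dict): user_id를 키로, 사용자 정보 딕셔너리를 값으로 갖는 전체 사용자 맵.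
--         max_depth (int, optional): 탐색할 최대 촌수(깊이). 기본값은 3.
--
--     Returns:
--         dict: 추천 후보 user_id를 키로, 촌수(degree)를 값으로 갖는 딕셔너리.
--               (예: {'user_004': 2, 'user_005': 2, 'user_006': 3})
--               나 자신(0촌)과 직접적인 친구(1촌)는 결과에서 제외됩니다.
--     """
--     # BFS 탐색을 위한 큐. (user_id, 현재 깊이)를 튜플로 저장합니다.
--     queue = deque([(target_user_id, 0)])
--     # 이미 방문한 사용자를 추적하여 무한 루프를 방지합니다.
--     visited = {target_user_id}
--     # 추천 후보와 그들의 촌수를 저장할 딕셔너리입니다.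
--     candidates = {}
--
--     while queue:
--         current_user_id, current_depth = queue.popleft() # 큐의 맨 앞에서부터 탐색
--
--         # 현재 깊이가 최대 탐색 깊이를 초과하면 더 이상 탐색하지 않습니다.
--         if current_depth >= max_depth:
--             continue
--
--         # 현재 사용자의 친구 목록을 가져옵니다. 친구가 없으면 빈 리스트를 사용합니다.
--         # all_users.get(current_user_id, {})는 사용자가 없을 경우 에러를 방지합니다.
--         friend_ids = all_users.get(current_user_id, {}).get("friends", [])
--
--         for friend_id in friend_ids:
--             if friend_id not in visited:
--                 visited.add(friend_id) # 방문 처리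
--                 new_depth = current_depth + 1
--                 queue.append((friend_id, new_depth))
--
--                 # 2촌 이상의 관계부터 추천 후보에 추가합니다 (1촌은 이미 친구이므로 제외).
--                 if new_depth > 1:
--                     candidates[friend_id] = new_depth
--
--     return candidates
-- ===== SOURCE B (Python) =====
-- def find_friend_candidates(target_user_id, all_users, max_depth=3):
--     # Staged per-level pipeline: flatten the whole level's friend lists, dedup in
--     # first-occurrence order with dict.fromkeys, subtract the seen set, then do bulk
--     # updates — no per-edge conditional, no (node, depth) queue.
--     seen = {target_user_id}
--     candidates = {}
--     layer = [target_user_id]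
--     depth = 0
--     while layer and depth < max_depth:
--         adj = [f for u in layer for f in all_users.get(u, {}).get("friends", [])]
--         layer = [f for f in dict.fromkeys(adj) if f not in seen]
--         seen.update(layer)
--         depth += 1
--         if depth > 1:
--             candidates.update((f, depth) for f in layer)
--     return candidates
-- ===== Notes on version B (the rewrite author's own statement) =====
-- stated objective: alternative
-- what changed: Replaces A's per-edge interleaved BFS (a FIFO queue of (node,depth) tuples with a conditional that mutates visited/queue/candidates one friend at a time) by a staged per-level pipeline: flatten the level's friend lists, dedup in first-occurrence order with dict.fromkeys, subtract the seen set, then bulk-update seen and candidates.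
import Mathlib
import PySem

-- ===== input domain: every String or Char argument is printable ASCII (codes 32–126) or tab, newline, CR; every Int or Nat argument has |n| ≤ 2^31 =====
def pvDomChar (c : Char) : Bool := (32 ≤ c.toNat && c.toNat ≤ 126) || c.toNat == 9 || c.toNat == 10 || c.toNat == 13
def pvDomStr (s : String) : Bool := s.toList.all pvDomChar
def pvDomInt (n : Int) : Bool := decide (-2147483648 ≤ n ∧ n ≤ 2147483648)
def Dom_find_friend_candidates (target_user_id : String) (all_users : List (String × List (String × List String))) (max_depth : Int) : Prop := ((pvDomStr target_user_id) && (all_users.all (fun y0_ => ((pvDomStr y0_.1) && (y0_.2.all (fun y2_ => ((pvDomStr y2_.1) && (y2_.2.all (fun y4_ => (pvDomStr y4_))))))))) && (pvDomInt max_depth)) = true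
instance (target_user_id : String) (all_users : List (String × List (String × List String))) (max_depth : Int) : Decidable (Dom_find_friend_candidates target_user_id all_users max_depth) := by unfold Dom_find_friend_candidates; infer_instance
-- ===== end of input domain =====

-- B replaces A's per-edge BFS on a (node, depth) queue by a staged per-level pipeline
-- (flatten, ordered dedup, set-difference, bulk updates); same return value (objective: alternative).

-- ===== PORT A =====
-- port of `all_users.get(u, {}).get("friends", [])` (the same expression occurs in both Pythons)
def pvFriends (all_users : List (String × List (String × List String))) (u : String) : List String :=
  match PySem.Dict.get? (PySem.Dict.mk all_users) u with
  | none => []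
  | some info => (PySem.Dict.get? (PySem.Dict.mk info) "friends").getD []

-- one iteration of A's inner `for friend_id in friend_ids` loop; state = (queue tail, visited, candidates)
def pvStepA (d : Int) (st : List (String × Int) × PySem.Set String × PySem.Dict String Int)
    (fr : String) : List (String × Int) × PySem.Set String × PySem.Dict String Int :=
  if st.2.1.contains fr then st
  else (st.1 ++ [(fr, d + 1)], st.2.1.add fr,
        if d + 1 > 1 then st.2.2.insert fr (d + 1) else st.2.2)

-- every user id A can ever enqueue (for the termination measure only)
def pvUniv (all_users : List (String × List (String × List String))) : List String :=
  all_users.flatMap (fun p => p.2.flatMap (fun q => q.2))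

-- number of universe ids not yet visited
def pvFL (all_users : List (String × List (String × List String))) (v : PySem.Set String) : Nat :=
  ((pvUniv all_users).filter (fun x => !(v.contains x))).length

def pvMeas (all_users : List (String × List (String × List String)))
    (q : List (String × Int)) (v : PySem.Set String) : Nat :=
  q.length + 2 * pvFL all_users v

lemma pvFriends_subset (all_users : List (String × List (String × List String))) (u : String) :
    ∀ x ∈ pvFriends all_users u, x ∈ pvUniv all_users := by
  intro x hx
  unfold pvFriends at hx
  revert hx
  cases h1 : PySem.Dict.get? (PySem.Dict.mk all_users) u with
  | none => intro hx; simp at hx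
  | some info =>
    cases h2 : PySem.Dict.get? (PySem.Dict.mk info) "friends" with
    | none => intro hx; simp [h2] at hx
    | some fl =>
      intro hx
      simp only [h2, Option.getD_some] at hx
      simp only [PySem.Dict.get?, Option.map_eq_some_iff] at h1 h2
      obtain ⟨p1, hp1, hp1e⟩ := h1
      obtain ⟨p2, hp2, hp2e⟩ := h2
      have m1 := List.mem_of_find?_eq_some hp1
      have m2 := List.mem_of_find?_eq_some hp2
      simp only [pvUniv, List.mem_flatMap]
      exact ⟨p1, m1, p2, by rw [hp1e]; exact m2, by rw [hp2e]; exact hx⟩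

lemma pvFL_add (all_users : List (String × List (String × List String)))
    (v : PySem.Set String) (fr : String) (hU : fr ∈ pvUniv all_users)
    (hv : v.contains fr = false) :
    pvFL all_users (v.add fr) + 1 ≤ pvFL all_users v := by
  unfold pvFL
  have hnv : fr ∉ v := by simpa [PySem.Set.contains] using hv
  have hadd : v.add fr = v ++ [fr] := by simp [PySem.Set.add, hnv]
  have h1 : ((pvUniv all_users).filter (fun x => !((v.add fr).contains x))) =
      ((pvUniv all_users).filter (fun x => !(v.contains x))).filter (fun x => !(x == fr)) := by
    rw [List.filter_filter]
    apply List.filter_congr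
    intro x _
    rw [hadd]
    simp only [PySem.Set.contains, List.contains_append]
    by_cases hxf : x = fr <;> by_cases hxv : x ∈ v <;>
      simp [hxf, hxv]
  rw [h1]
  have hm : fr ∈ (pvUniv all_users).filter (fun x => !(v.contains x)) := by
    rw [List.mem_filter]
    exact ⟨hU, by simp [PySem.Set.contains, hnv]⟩
  have := List.length_filter_lt_length_iff_exists
    (l := (pvUniv all_users).filter (fun x => !(v.contains x))) (p := fun x => !(x == fr))
  have hlt : (((pvUniv all_users).filter (fun x => !(v.contains x))).filter
      (fun x => !(x == fr))).length < ((pvUniv all_users).filter (fun x => !(v.contains x))).length := by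
    rw [this]
    exact ⟨fr, hm, by simp⟩
  omega

-- the whole inner loop of A does not increase the measure (friends ⊆ universe)
lemma pvFoldA_meas (all_users : List (String × List (String × List String))) (d : Int)
    (friends : List String) (h : ∀ x ∈ friends, x ∈ pvUniv all_users) :
    ∀ q v c, pvMeas all_users ((friends.foldl (pvStepA d) (q, v, c)).1)
        ((friends.foldl (pvStepA d) (q, v, c)).2.1) ≤ pvMeas all_users q v := by
  induction friends with
  | nil => intro q v c; simp
  | cons fr fs ih =>
    intro q v c
    have htail : ∀ x ∈ fs, x ∈ pvUniv all_users := fun x hx => h x (List.mem_cons_of_mem _ hx)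
    simp only [List.foldl_cons]
    by_cases hc : v.contains fr
    · simp only [pvStepA, hc, if_pos]
      exact ih htail q v c
    · simp only [pvStepA, hc, Bool.false_eq_true, if_neg, not_false_iff]
      refine le_trans (ih htail _ _ _) ?_
      have := pvFL_add all_users v fr (h fr List.mem_cons_self) (by simpa using hc)
      simp only [pvMeas, List.length_append, List.length_cons, List.length_nil]
      omega

-- port of A's `while queue:` loop
def pvLoopA (all_users : List (String × List (String × List String))) (md : Int) :
    List (String × Int) → PySem.Set String → PySem.Dict String Int → PySem.Dict String Int
  | [], _, c => c
  | (u, d) :: q, v, c =>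
    if md ≤ d then pvLoopA all_users md q v c
    else
      let r := (pvFriends all_users u).foldl (pvStepA d) (q, v, c)
      pvLoopA all_users md r.1 r.2.1 r.2.2
  termination_by q v _ => pvMeas all_users q v
  decreasing_by
  · simp [pvMeas]
  · have := pvFoldA_meas all_users d (pvFriends all_users u) (pvFriends_subset all_users u) q v c
    simp only [pvMeas, List.length_cons] at *
    omega

def find_friend_candidates (target_user_id : String) (all_users : List (String × List (String × List String))) (max_depth : Int) : List (String × Int) :=
  (pvLoopA all_users max_depth [(target_user_id, 0)]
    (PySem.Set.ofList [target_user_id]) PySem.Dict.empty).items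

-- ===== PORT B =====
-- Source B's `while layer and depth < max_depth:` loop; the guard `depth < max_depth` is ported as the
-- remaining-iteration count (max_depth - depth).toNat, the running `depth` is carried alongside
def pvLoopB (all_users : List (String × List (String × List String))) :
    Nat → Int → List String → PySem.Set String → PySem.Dict String Int → PySem.Dict String Int
  | 0, _, _, _, c => c
  | n + 1, depth, layer, seen, c =>
    if layer = [] then c
    else
      let adj := layer.flatMap (pvFriends all_users)                               -- adj = [f for u in layer for f in …]
      let nxt := (PySem.List.dedup adj).filter (fun f => !(PySem.Set.contains seen f))  -- [f for f in dict.fromkeys(adj) if f not in seen]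
      let seen' := PySem.Set.update seen nxt                                       -- seen.update(layer)
      let c' := if depth + 1 > 1 then nxt.foldl (fun c f => c.insert f (depth + 1)) c else c
      pvLoopB all_users n (depth + 1) nxt seen' c'

def find_friend_candidates_alt (target_user_id : String) (all_users : List (String × List (String × List String))) (max_depth : Int) : List (String × Int) :=
  (pvLoopB all_users max_depth.toNat 0 [target_user_id]
    (PySem.Set.ofList [target_user_id]) PySem.Dict.empty).items

-- ===== PRECONDITION & SPEC =====
def Spec_find_friend_candidates (target_user_id : String) (all_users : List (String × List (String × List String))) (max_depth : Int) (out : List (String × Int)) : Prop := out = find_friend_candidates_alt target_user_id all_users max_depth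
instance (target_user_id : String) (all_users : List (String × List (String × List String))) (max_depth : Int) (out : List (String × Int)) : Decidable (Spec_find_friend_candidates target_user_id all_users max_depth out) := by unfold Spec_find_friend_candidates; infer_instance

-- ===== CLAIM (what is proved, stated in full; the proofs are below) =====
def Claim_equal_find_friend_candidates : Prop := ∀ (target_user_id : String) (all_users : List (String × List (String × List String))) (max_depth : Int), Dom_find_friend_candidates target_user_id all_users max_depth → Spec_find_friend_candidates target_user_id all_users max_depth (find_friend_candidates target_user_id all_users max_depth)

-- ===== LEMMAS AND PROOFS =====

-- proof-side device: A's inner loop, restated per friend with state (visited, candidates, discovered)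
def pvStepB (depth : Int) (st : PySem.Set String × PySem.Dict String Int × List String)
    (fr : String) : PySem.Set String × PySem.Dict String Int × List String :=
  if st.1.contains fr then st
  else (st.1.add fr, if depth > 1 then st.2.1.insert fr depth else st.2.1, st.2.2 ++ [fr])

def pvExpandB (all_users : List (String × List (String × List String))) (depth : Int)
    (st : PySem.Set String × PySem.Dict String Int × List String) (node : String) :
    PySem.Set String × PySem.Dict String Int × List String :=
  (pvFriends all_users node).foldl (pvStepB depth) st

-- proof-side device: fold-based level-synchronous loop (depth = the level being built)
def pvLevelB (all_users : List (String × List (String × List String))) :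
    Nat → Int → List String → PySem.Set String → PySem.Dict String Int → PySem.Dict String Int
  | 0, _, _, _, c => c
  | n + 1, depth, frontier, v, c =>
    if frontier = [] then c
    else
      let r := frontier.foldl (pvExpandB all_users depth) (v, c, [])
      pvLevelB all_users n (depth + 1) r.2.2 r.1 r.2.1

-- proof-side device: the new elements a scan of adj discovers (seen grows as it goes)
def pvNew (seen : PySem.Set String) : List String → List String
  | [] => []
  | f :: fs => if seen.contains f then pvNew seen fs else f :: pvNew (seen.add f) fs

-- mid-level state of B: frontier rest f at node-depth d, next-frontier so far g
def pvBr (all_users : List (String × List (String × List String))) (md d : Int)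
    (f g : List String) (v : PySem.Set String) (c : PySem.Dict String Int) :
    PySem.Dict String Int :=
  if md ≤ d then c
  else
    let r := f.foldl (pvExpandB all_users (d + 1)) (v, c, g)
    pvLevelB all_users (md - d - 1).toNat (d + 2) r.2.2 r.1 r.2.1

-- A drains (returns candidates unchanged) once every queued depth has reached max_depth
lemma pvLoopA_drain (all_users : List (String × List (String × List String))) (md : Int) :
    ∀ q v c, (∀ p ∈ q, md ≤ p.2) → pvLoopA all_users md q v c = c := by
  intro q
  induction q with
  | nil => intro v c _; rw [pvLoopA]
  | cons p q ih =>
    intro v c h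
    obtain ⟨u, d⟩ := p
    rw [pvLoopA]
    rw [if_pos (h (u, d) List.mem_cons_self)]
    exact ih v c (fun p hp => h p (List.mem_cons_of_mem _ hp))

-- the per-friend fold appends to the discovered-list accumulator
lemma pvStepB_shift (d : Int) (friends : List String) :
    ∀ v c (g : List String),
      friends.foldl (pvStepB d) (v, c, g) =
        ((friends.foldl (pvStepB d) (v, c, [])).1,
         (friends.foldl (pvStepB d) (v, c, [])).2.1,
         g ++ (friends.foldl (pvStepB d) (v, c, [])).2.2) := by
  induction friends with
  | nil => intro v c g; simp
  | cons fr fs ih =>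
    intro v c g
    simp only [List.foldl_cons]
    by_cases hc : v.contains fr
    · simp only [pvStepB, hc, if_pos]
      exact ih v c g
    · simp only [pvStepB, hc, Bool.false_eq_true, if_neg, not_false_iff]
      rw [ih _ _ (g ++ [fr]), ih _ _ ([] ++ [fr])]
      simp [List.append_assoc]

-- A's inner loop = the per-friend fold, with the new entries appended to the queue at depth d+1
lemma pvFoldAB (d : Int) (friends : List String) :
    ∀ (q : List (String × Int)) v c,
      friends.foldl (pvStepA d) (q, v, c) =
        (q ++ ((friends.foldl (pvStepB (d + 1)) (v, c, [])).2.2).map (fun x => (x, d + 1)),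
         (friends.foldl (pvStepB (d + 1)) (v, c, [])).1,
         (friends.foldl (pvStepB (d + 1)) (v, c, [])).2.1) := by
  induction friends with
  | nil => intro q v c; simp
  | cons fr fs ih =>
    intro q v c
    simp only [List.foldl_cons]
    by_cases hc : v.contains fr
    · simp only [pvStepA, pvStepB, hc, if_pos]
      exact ih q v c
    · simp only [pvStepA, pvStepB, hc, Bool.false_eq_true, if_neg, not_false_iff]
      rw [ih (q ++ [(fr, d + 1)]) _ _]
      rw [pvStepB_shift (d + 1) fs _ _ ([] ++ [fr])]
      simp [List.append_assoc]

-- the per-friend fold: visited growth is paid for by the unvisited-universe count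
lemma pvFoldB_meas (all_users : List (String × List (String × List String))) (d : Int)
    (friends : List String) (h : ∀ x ∈ friends, x ∈ pvUniv all_users) :
    ∀ v c (g : List String),
      2 * pvFL all_users ((friends.foldl (pvStepB d) (v, c, g)).1) +
          ((friends.foldl (pvStepB d) (v, c, g)).2.2).length ≤
        2 * pvFL all_users v + g.length := by
  induction friends with
  | nil => intro v c g; simp
  | cons fr fs ih =>
    intro v c g
    have htail : ∀ x ∈ fs, x ∈ pvUniv all_users := fun x hx => h x (List.mem_cons_of_mem _ hx)
    simp only [List.foldl_cons]
    by_cases hc : v.contains fr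
    · simp only [pvStepB, hc, if_pos]
      exact ih htail v c g
    · simp only [pvStepB, hc, Bool.false_eq_true, if_neg, not_false_iff]
      refine le_trans (ih htail _ _ _) ?_
      have := pvFL_add all_users v fr (h fr List.mem_cons_self) (by simpa using hc)
      simp only [List.length_append, List.length_singleton]
      omega

-- the bridge: A's queue, laid out as one frontier at depth d followed by a partial
-- next frontier at depth d+1, computes the fold-based level loop's mid-level continuation
lemma pvBridge (all_users : List (String × List (String × List String))) (md : Int) :
    ∀ n : Nat, ∀ (d : Int) (f g : List String) v c,
      2 * (f.length + g.length + 2 * pvFL all_users v) + (if f = [] then 1 else 0) ≤ n →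
      pvLoopA all_users md (f.map (fun x => (x, d)) ++ g.map (fun x => (x, d + 1))) v c =
        pvBr all_users md d f g v c := by
  intro n
  induction n using Nat.strong_induction_on with
  | _ n IH =>
  intro d f g v c hm
  cases f with
  | nil =>
    cases g with
    | nil =>
      simp only [List.map_nil, List.nil_append]
      rw [pvLoopA]
      unfold pvBr
      by_cases hmd : md ≤ d
      · rw [if_pos hmd]
      · rw [if_neg hmd]
        simp only [List.foldl_nil]
        cases hR : (md - d - 1).toNat with
        | zero => rw [pvLevelB]
        | succ n => rw [pvLevelB]; rw [if_pos rfl]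
    | cons w g' =>
      by_cases hmd : md ≤ d
      · rw [pvLoopA_drain]
        · unfold pvBr; rw [if_pos hmd]
        · intro p hp
          simp only [List.map_nil, List.nil_append, List.mem_map] at hp
          obtain ⟨x, _, rfl⟩ := hp
          simpa using by omega
      · have hm' : 2 * ((w :: g').length + ([] : List String).length + 2 * pvFL all_users v)
            + (if (w :: g') = ([] : List String) then 1 else 0) ≤ n - 1 := by
          simp only [List.length_cons, List.length_nil] at hm ⊢
          simp at hm ⊢
          omega
        have hrec := IH (n - 1) (by
            simp only [List.length_nil, List.length_cons] at hm
            simp at hm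
            omega) (d + 1) (w :: g') [] v c hm'
        simp only [List.map_nil, List.nil_append, List.append_nil] at hrec ⊢
        rw [hrec]
        unfold pvBr
        rw [if_neg hmd]
        by_cases h2 : md ≤ d + 1
        · rw [if_pos h2]
          have hR : (md - d - 1).toNat = 0 := by omega
          rw [hR]
          simp only [List.foldl_nil]
          rw [pvLevelB]
        · rw [if_neg h2]
          simp only [List.foldl_nil]
          have hR : (md - d - 1).toNat = (md - d - 2).toNat + 1 := by omega
          rw [hR, pvLevelB]
          rw [if_neg (by simp : ¬ (w :: g') = ([] : List String))]
          have e0 : md - (d + 1) - 1 = md - d - 2 := by ring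
          have e1 : d + 1 + 1 = d + 2 := by ring
          have e2 : d + 1 + 2 = d + 3 := by ring
          have e3 : d + 2 + 1 = d + 3 := by ring
          rw [e0, e1, e2, e3]
  | cons u f' =>
    by_cases hmd : md ≤ d
    · rw [pvLoopA_drain]
      · unfold pvBr; rw [if_pos hmd]
      · intro p hp
        simp only [List.map_cons, List.cons_append, List.mem_cons, List.mem_append,
          List.mem_map] at hp
        rcases hp with rfl | ⟨x, _, rfl⟩ | ⟨x, _, rfl⟩ <;> simpa using by omega
    · simp only [List.map_cons, List.cons_append]
      rw [pvLoopA]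
      rw [if_neg hmd]
      simp only [pvFoldAB d (pvFriends all_users u)]
      have hq : (f'.map (fun x => (x, d)) ++ g.map (fun x => (x, d + 1))) ++
          ((pvFriends all_users u).foldl (pvStepB (d + 1)) (v, c, [])).2.2.map
            (fun x => (x, d + 1)) =
          f'.map (fun x => (x, d)) ++
          (g ++ ((pvFriends all_users u).foldl (pvStepB (d + 1)) (v, c, [])).2.2).map
            (fun x => (x, d + 1)) := by
        simp [List.map_append, List.append_assoc]
      rw [hq]
      have hmeas := pvFoldB_meas all_users (d + 1) (pvFriends all_users u)
        (pvFriends_subset all_users u) v c []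
      have hrec := IH (n - 1) (by
          simp only [List.length_cons] at hm
          omega)
        d f' (g ++ ((pvFriends all_users u).foldl (pvStepB (d + 1)) (v, c, [])).2.2)
        ((pvFriends all_users u).foldl (pvStepB (d + 1)) (v, c, [])).1
        ((pvFriends all_users u).foldl (pvStepB (d + 1)) (v, c, [])).2.1
        (by
          simp only [List.length_append, List.length_nil] at hmeas ⊢
          simp only [List.length_cons] at hm
          split <;> omega)
      rw [hrec]
      unfold pvBr
      rw [if_neg hmd, if_neg hmd]
      simp only [List.foldl_cons]
      have he : pvExpandB all_users (d + 1) (v, c, g) u =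
          (((pvFriends all_users u).foldl (pvStepB (d + 1)) (v, c, [])).1,
           ((pvFriends all_users u).foldl (pvStepB (d + 1)) (v, c, [])).2.1,
           g ++ ((pvFriends all_users u).foldl (pvStepB (d + 1)) (v, c, [])).2.2) := by
        unfold pvExpandB
        rw [pvStepB_shift (d + 1) (pvFriends all_users u) v c g]
      rw [he]

-- the per-friend fold over a flat list, in staged form: discovered = pvNew, visited = update, dict = fold
lemma pvStepB_staged (d : Int) : ∀ (adj : List String) seen cand (g : List String),
    adj.foldl (pvStepB d) (seen, cand, g) =
      (PySem.Set.update seen (pvNew seen adj),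
       (pvNew seen adj).foldl (fun c f => if d > 1 then c.insert f d else c) cand,
       g ++ pvNew seen adj) := by
  intro adj
  induction adj with
  | nil => intro seen cand g; simp [pvNew, PySem.Set.update_nil]
  | cons f fs ih =>
    intro seen cand g
    simp only [List.foldl_cons, pvNew]
    by_cases hc : seen.contains f
    · simp only [pvStepB, hc, if_pos]
      exact ih seen cand g
    · simp only [pvStepB, hc, Bool.false_eq_true, if_neg, not_false_iff]
      rw [ih (seen.add f) _ (g ++ [f])]
      simp only [List.foldl_cons]
      rw [PySem.Set.update_cons]
      simp [List.append_assoc]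

-- pvNew = ordered dedup then set-difference (Source B's staged form)
lemma pvNew_eq_filter : ∀ (adj : List String) (seen : PySem.Set String),
    pvNew seen adj = (PySem.List.dedup adj).filter (fun f => !(PySem.Set.contains seen f)) := by
  intro adj
  induction adj with
  | nil => intro seen; simp [pvNew, PySem.List.dedup]
  | cons f fs ih =>
    intro seen
    rw [show PySem.List.dedup (f :: fs) = PySem.Set.ofList (f :: fs) from by simp,
      PySem.Set.ofList_cons]
    have hdf : ∀ (s : PySem.Set String) (hf : PySem.Set.contains s f = true),
        ((PySem.Set.ofList fs).discard f).filter (fun x => !(PySem.Set.contains s x)) =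
          (PySem.Set.ofList fs).filter (fun x => !(PySem.Set.contains s x)) := by
      intro s hf
      simp only [PySem.Set.discard, List.filter_filter]
      apply List.filter_congr
      intro x _
      by_cases hxf : x = f
      · subst hxf
        have hmf : x ∈ s := by simpa [PySem.Set.contains_iff] using hf
        simp [hmf]
      · simp [hxf]
    by_cases hc : seen.contains f
    · simp only [pvNew, hc, if_true, List.filter_cons, Bool.not_true]
      rw [ih seen, show PySem.List.dedup fs = PySem.Set.ofList fs from by simp]
      exact (hdf seen hc).symm
    · simp only [pvNew, hc, Bool.false_eq_true, if_false, List.filter_cons, Bool.not_false,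
        if_true]
      rw [ih (seen.add f), show PySem.List.dedup fs = PySem.Set.ofList fs from by simp]
      congr 1
      rw [show ((PySem.Set.ofList fs).filter (fun x => !(PySem.Set.contains (seen.add f) x))) =
          ((PySem.Set.ofList fs).filter (fun x => !(PySem.Set.contains seen x))).filter
            (fun x => !(x == f)) from by
        rw [List.filter_filter]
        apply List.filter_congr
        intro x _
        by_cases hxf : x = f
        · subst hxf; simp [PySem.Set.mem_add]
        · simp [hxf, PySem.Set.mem_add]]
      rw [show ((PySem.Set.ofList fs).discard f).filter (fun x => !(PySem.Set.contains seen x)) =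
          (((PySem.Set.ofList fs).filter (fun x => !(PySem.Set.contains seen x))).filter
            (fun x => !(x == f))) from by
        simp only [PySem.Set.discard, List.filter_filter]
        apply List.filter_congr
        intro x _
        by_cases hxf : x = f
        · subst hxf; simp
        · simp [Bool.and_comm]]

-- the fold-based level loop computes Source B's staged loop (its depth argument runs one ahead)
lemma pvLevelB_eq_pvLoopB (all_users : List (String × List (String × List String))) :
    ∀ (n : Nat) (d : Int) (f : List String) v c,
      pvLevelB all_users n d f v c = pvLoopB all_users n (d - 1) f v c := by
  intro n
  induction n with
  | zero => intro d f v c; rw [pvLevelB, pvLoopB]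
  | succ n ih =>
    intro d f v c
    rw [pvLevelB, pvLoopB]
    by_cases hf : f = []
    · rw [if_pos hf, if_pos hf]
    · rw [if_neg hf, if_neg hf]
      simp only
      rw [show ∀ st, f.foldl (pvExpandB all_users d) st =
            (f.flatMap (pvFriends all_users)).foldl (pvStepB d) st from
          fun st => (List.foldl_flatMap).symm]
      rw [pvStepB_staged d (f.flatMap (pvFriends all_users)) v c []]
      rw [pvNew_eq_filter]
      simp only [List.nil_append]
      rw [ih (d + 1)]
      have e1 : d - 1 + 1 = d := by ring
      rw [e1]
      congr 1
      · omega
      · by_cases hd : d > 1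
        · simp [hd]
        · simp [hd, List.foldl_fixed]

-- ===== VERDICT (by name: the statement is the Claim_ definition above) =====
theorem find_friend_candidates_spec : Claim_equal_find_friend_candidates := by
  unfold Claim_equal_find_friend_candidates
  intro t au md _
  unfold Spec_find_friend_candidates find_friend_candidates find_friend_candidates_alt
  have hb := pvBridge au md (2 * (1 + 0 + 2 * pvFL au (PySem.Set.ofList [t]))) 0 [t] []
    (PySem.Set.ofList [t]) PySem.Dict.empty (by simp)
  simp only [List.map_cons, List.map_nil, List.append_nil] at hb
  rw [hb]
  unfold pvBr
  by_cases h0 : md ≤ 0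
  · rw [if_pos h0]
    have hR : md.toNat = 0 := by omega
    rw [hR, pvLoopB]
  · rw [if_neg h0]
    have hL := pvLevelB_eq_pvLoopB au md.toNat 1 [t] (PySem.Set.ofList [t]) PySem.Dict.empty
    rw [show (1 : Int) - 1 = 0 from by ring] at hL
    rw [← hL]
    have hR : md.toNat = (md - 1).toNat + 1 := by omega
    rw [hR, pvLevelB]
    rw [if_neg (by simp : ¬ ([t] : List String) = [])]
    norm_num
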